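-- pv_equiv track=rewrite | github.com/faisalburhanudin/research | backtesting.py | get_owned_share
-- ===== SOURCE A (Python) =====
-- def get_owned_share(buy_share):
--     owned = 0
--     for i in reversed(buy_share):
--         if i < 0:
--             break
--         else:
--             owned += i
--
--     return owned
-- ===== SOURCE B (Python) =====
-- def get_owned_share(buy_share):
--     # One forward pass: a negative element resets the running total,
--     # so the result is the sum of the suffix after the last negative.
--     owned = 0
--     for x in buy_share:
--         owned = 0 if x < 0 else owned + x
--     return owned
-- ===== Notes on version B (the rewrite author's own statement) =====
-- stated objective: simpler
-- what changed: Replaces A's reversed iteration with an early break by a single forward fold whose accumulator resets to 0 at each negative element, so no reversal and no break are needed.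
import Mathlib
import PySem

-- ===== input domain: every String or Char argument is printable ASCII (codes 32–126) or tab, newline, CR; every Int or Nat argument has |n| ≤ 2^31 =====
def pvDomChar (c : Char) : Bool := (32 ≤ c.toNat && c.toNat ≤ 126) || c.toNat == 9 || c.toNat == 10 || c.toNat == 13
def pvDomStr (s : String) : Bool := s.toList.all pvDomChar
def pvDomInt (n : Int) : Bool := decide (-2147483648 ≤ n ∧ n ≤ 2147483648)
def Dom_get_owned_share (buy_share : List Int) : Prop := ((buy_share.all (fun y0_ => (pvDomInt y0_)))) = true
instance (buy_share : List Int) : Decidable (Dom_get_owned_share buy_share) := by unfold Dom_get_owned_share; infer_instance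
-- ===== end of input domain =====

-- B replaces A's reverse loop with early break by one forward fold that resets on negatives (objective: simpler).


-- ===== PORT A =====
-- loop over reversed(buy_share); 'break' = return current accumulator
def getOwnedLoopA : List Int → Int → Int
  | [], owned => owned
  | i :: rest, owned => if i < 0 then owned else getOwnedLoopA rest (owned + i)

def get_owned_share (buy_share : List Int) : Int :=
  getOwnedLoopA buy_share.reverse 0

-- ===== PORT B =====
def get_owned_share_alt (buy_share : List Int) : Int :=
  buy_share.foldl (fun owned x => if x < 0 then 0 else owned + x) 0

-- ===== PRECONDITION & SPEC =====
def Spec_get_owned_share (buy_share : List Int) (out : Int) : Prop := out = get_owned_share_alt buy_share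
instance (buy_share : List Int) (out : Int) : Decidable (Spec_get_owned_share buy_share out) := by unfold Spec_get_owned_share; infer_instance

-- ===== CLAIM (what is proved, stated in full; the proofs are below) =====
def Claim_equal_get_owned_share : Prop := ∀ (buy_share : List Int), Dom_get_owned_share buy_share → Spec_get_owned_share buy_share (get_owned_share buy_share)

-- ===== LEMMAS AND PROOFS =====

theorem getOwnedLoopA_acc (l : List Int) : ∀ acc : Int, getOwnedLoopA l acc = acc + getOwnedLoopA l 0 := by
  induction l with
  | nil => intro acc; simp [getOwnedLoopA]
  | cons i rest ih =>
    intro acc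
    by_cases h : i < 0
    · simp [getOwnedLoopA, h]
    · simp only [getOwnedLoopA, if_neg h]
      rw [ih (acc + i), ih (0 + i)]
      ring

theorem main_eq (l : List Int) :
    l.foldl (fun owned x => if x < 0 then 0 else owned + x) 0 = getOwnedLoopA l.reverse 0 := by
  induction l using List.reverseRecOn with
  | nil => simp [getOwnedLoopA]
  | append_singleton l x ih =>
    rw [List.foldl_append, List.reverse_append]
    simp only [List.foldl_cons, List.foldl_nil, List.reverse_cons, List.reverse_nil,
      List.nil_append, List.singleton_append, getOwnedLoopA]
    by_cases h : x < 0
    · simp [h]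
    · rw [if_neg h, if_neg h, ih, getOwnedLoopA_acc l.reverse (0 + x)]
      ring

-- ===== VERDICT (by name: the statement is the Claim_ definition above) =====
theorem get_owned_share_spec : Claim_equal_get_owned_share := by
  intro l _
  unfold Spec_get_owned_share get_owned_share get_owned_share_alt
  exact (main_eq l).symm
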